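-- pv_equiv track=rewrite | github.com/nathanial/silent-king-clj | scripts/check_parens.py | read_symbol
-- ===== SOURCE A (Python) =====
-- from typing import List, Optional, Sequence, Tuple
--
-- WHITESPACE = set(" \t\r\n,")
--
-- def skip_comment(text: str, idx: int) -> int:
--     while idx < len(text) and text[idx] != "\n":
--         idx += 1
--     return idx
--
-- def skip_space_and_comments(text: str, idx: int) -> int:
--     length = len(text)
--     while idx < length:
--         ch = text[idx]
--         if ch in WHITESPACE:
--             idx += 1
--             continue
--         if ch == ";":
--             idx = skip_comment(text, idx)
--             continue
--         break
--     return idx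
--
-- def read_symbol(text: str, idx: int) -> Tuple[Optional[str], int]:
--     idx = skip_space_and_comments(text, idx)
--     length = len(text)
--     if idx >= length:
--         return None, idx
--     ch = text[idx]
--     if ch in '()[]{}"':
--         return None, idx
--     start = idx
--     while idx < length:
--         ch = text[idx]
--         if ch in WHITESPACE or ch in '()[]{}"':
--             break
--         if ch == ";":
--             break
--         idx += 1
--     return text[start:idx], idx
-- ===== SOURCE B (Python) =====
-- import re
--
-- # One regex pass consumes whitespace/commas and ';' line comments; a second
-- # regex takes the maximal run of non-terminator characters as the symbol.
-- _SKIP = re.compile(r'(?:[ \t\r\n,]|;[^\n]*)*')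
-- _SYMBOL = re.compile(r'[^ \t\r\n,;()\[\]{}"]+')
--
-- def read_symbol(text, idx):
--     if idx >= len(text):
--         return None, idx
--     idx = _SKIP.match(text, idx).end()
--     m = _SYMBOL.match(text, idx)
--     if m:
--         return m.group(), m.end()
--     return None, idx
-- ===== Notes on version B (the rewrite author's own statement) =====
-- stated objective: idiomatic
-- what changed: Replaced the three hand-written character-scan loops by two precompiled regular expressions: one greedy pattern consumes whitespace/commas and ';' line comments in a single match, a second pattern takes the maximal run of non-terminator characters as the symbol.
-- outside the precondition, e.g. on read_symbol('a b', -3): A returns ('a', -2), B returns ('a', 1)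
import Mathlib
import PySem

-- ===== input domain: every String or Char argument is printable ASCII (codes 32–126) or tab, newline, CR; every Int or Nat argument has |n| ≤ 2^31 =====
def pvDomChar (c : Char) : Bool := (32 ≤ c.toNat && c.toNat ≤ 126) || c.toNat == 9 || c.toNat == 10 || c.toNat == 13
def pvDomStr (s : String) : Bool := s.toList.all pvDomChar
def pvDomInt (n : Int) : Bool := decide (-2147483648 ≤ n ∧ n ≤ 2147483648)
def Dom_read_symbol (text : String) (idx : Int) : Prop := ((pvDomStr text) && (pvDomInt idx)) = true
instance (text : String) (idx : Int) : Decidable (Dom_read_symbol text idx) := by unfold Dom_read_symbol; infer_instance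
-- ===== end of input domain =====

-- B replaces the three hand-written scan loops by two regex-style single passes (skip pattern + symbol pattern); return values proved equal for idx ≥ 0.


-- ===== PORT A =====
-- WHITESPACE = set(" \t\r\n,")
def pyWHITESPACE : List Char := [' ', '\t', '\r', '\n', ',']

-- text[idx] ported as PySem.Str.pyGet?; the '.getD' default is only reached where
-- Python raises IndexError (idx < -len), which Pre_read_symbol excludes.
def skip_comment (text : String) (idx : Int) : Int :=
  if _h : idx < (PySem.Str.len text : Int) ∧ (PySem.Str.pyGet? text idx).getD '\n' ≠ '\n' then
    skip_comment text (idx + 1)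
  else idx
termination_by ((PySem.Str.len text : Int) - idx).toNat
decreasing_by omega

-- termination helper for skip_space_and_comments: skip_comment moves strictly right of a non-'\n' char
theorem skip_comment_ge (text : String) (idx : Int) : idx ≤ skip_comment text idx := by
  fun_induction skip_comment text idx with
  | case1 i h ih => omega
  | case2 i h => omega

theorem skip_comment_gt (text : String) (idx : Int)
    (h : idx < (PySem.Str.len text : Int) ∧ (PySem.Str.pyGet? text idx).getD '\n' ≠ '\n') :
    idx < skip_comment text idx := by
  rw [skip_comment, dif_pos h]
  have := skip_comment_ge text (idx + 1)
  omega

def skip_space_and_comments (text : String) (idx : Int) : Int :=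
  if h : idx < (PySem.Str.len text : Int) then
    let ch := (PySem.Str.pyGet? text idx).getD ' '
    if ch ∈ pyWHITESPACE then skip_space_and_comments text (idx + 1)
    else if hc : ch = ';' then skip_space_and_comments text (skip_comment text idx)
    else idx
  else idx
termination_by ((PySem.Str.len text : Int) - idx).toNat
decreasing_by
  · omega
  · have hg : idx < skip_comment text idx := by
      apply skip_comment_gt
      refine ⟨h, ?_⟩
      cases hop : PySem.Str.pyGet? text idx with
      | none => simp only [ch, hop] at hc; exact absurd hc (by decide)
      | some c => simp only [ch, hop, Option.getD_some] at hc ⊢; rw [hc]; decide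
    omega

def read_symbol_loop (text : String) (idx : Int) : Int :=
  if h : idx < (PySem.Str.len text : Int) then
    let ch := (PySem.Str.pyGet? text idx).getD ' '
    if ch ∈ pyWHITESPACE ∨ ch ∈ ['(', ')', '[', ']', '{', '}', '"'] then idx
    else if ch = ';' then idx
    else read_symbol_loop text (idx + 1)
  else idx
termination_by ((PySem.Str.len text : Int) - idx).toNat
decreasing_by omega

def read_symbol (text : String) (idx : Int) : Option String × Int :=
  let idx1 := skip_space_and_comments text idx
  let length : Int := PySem.Str.len text
  if idx1 ≥ length then (none, idx1)
  else
    let ch := (PySem.Str.pyGet? text idx1).getD ' '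
    if ch ∈ ['(', ')', '[', ']', '{', '}', '"'] then (none, idx1)
    else
      let start := idx1
      let idx2 := read_symbol_loop text idx1
      (some (PySem.Str.slice text (some start) (some idx2)), idx2)

-- ===== PORT B =====
-- Source B: _SKIP = re.compile(r'(?:[ \t\r\n,]|;[^\n]*)*'); _SYMBOL = re.compile(r'[^ \t\r\n,;()\[\]{}"]+')
def wsB (c : Char) : Bool := c == ' ' || c == '\t' || c == '\r' || c == '\n' || c == ','
def termB (c : Char) : Bool :=
  wsB c || c == ';' || c == '(' || c == ')' || c == '[' || c == ']' || c == '{' || c == '}' || c == '"'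

-- length matched by _SKIP: greedily repeat (one ws/comma char | ';' followed by non-'\n' chars)
def skipLenB : List Char → Nat
  | [] => 0
  | c :: rest =>
    if wsB c then skipLenB rest + 1
    else if c = ';' then
      let k := (rest.takeWhile (fun d => d ≠ '\n')).length
      (k + 1) + skipLenB (rest.drop k)
    else 0
termination_by l => l.length
decreasing_by
  · simp
  · simp only [List.length_drop, List.length_cons]; omega

def read_symbol_alt (text : String) (idx : Int) : Option String × Int :=
  let cs := text.toList
  if idx ≥ (cs.length : Int) then (none, idx)
  else
    let pos : Nat := if idx < 0 then 0 else idx.toNat   -- re.match clamps a negative pos to 0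
    let j : Nat := pos + skipLenB (cs.drop pos)         -- _SKIP.match(text, idx).end()
    let tok := (cs.drop j).takeWhile (fun c => !termB c) -- _SYMBOL.match(text, j)
    if tok.isEmpty then (none, (j : Int))
    else (some (String.ofList tok), ((j + tok.length : Nat) : Int))

-- ===== PRECONDITION & SPEC =====
-- Pre_ excludes negative idx: for idx < -len(text) A raises IndexError, and for
-- -len ≤ idx < 0 A's value comes from Python negative-index wraparound, an artefact
-- of the implementation; B scans from position 0 there (re clamps a negative pos).
def Pre_read_symbol (text : String) (idx : Int) : Prop := 0 ≤ idx
instance (text : String) (idx : Int) : Decidable (Pre_read_symbol text idx) := by unfold Pre_read_symbol; infer_instance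
def pvWitness_read_symbol : String × Int := ("  ; note\n foo) bar", 0)

def Spec_read_symbol (text : String) (idx : Int) (out : Option String × Int) : Prop := out = read_symbol_alt text idx
instance (text : String) (idx : Int) (out : Option String × Int) : Decidable (Spec_read_symbol text idx out) := by unfold Spec_read_symbol; infer_instance

-- ===== CLAIM (what is proved, stated in full; the proofs are below) =====
def Claim_equal_read_symbol : Prop := ∀ (text : String) (idx : Int), Dom_read_symbol text idx → Pre_read_symbol text idx → Spec_read_symbol text idx (read_symbol text idx)

-- ===== LEMMAS AND PROOFS =====

theorem mem_ws_iff (c : Char) : c ∈ pyWHITESPACE ↔ wsB c = true := by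
  simp [pyWHITESPACE, wsB]
  tauto

theorem termB_iff (c : Char) :
    termB c = true ↔ ((c ∈ pyWHITESPACE ∨ c ∈ ['(', ')', '[', ']', '{', '}', '"']) ∨ c = ';') := by
  simp [termB, wsB, pyWHITESPACE]
  tauto

theorem char_at (text : String) (idx : Int) (h0 : 0 ≤ idx) (hlt : idx.toNat < text.toList.length) :
    PySem.Str.pyGet? text idx = some (text.toList[idx.toNat]) := by
  have h := PySem.Str.pyGet?_natCast text idx.toNat
  rw [Int.toNat_of_nonneg h0] at h
  rw [h]
  exact List.getElem?_eq_getElem hlt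

theorem skip_comment_eq (text : String) (idx : Int) (h0 : 0 ≤ idx) :
    skip_comment text idx
      = idx + (((text.toList.drop idx.toNat).takeWhile (fun d => d ≠ '\n')).length : Int) := by
  fun_induction skip_comment text idx with
  | case1 i h ih =>
    obtain ⟨hlt, hne⟩ := h
    rw [PySem.Str.len_eq] at hlt
    have h0i : 0 ≤ i := h0
    have hn : i.toNat < text.toList.length := by omega
    rw [char_at text i h0i hn] at hne
    simp only [Option.getD_some] at hne
    rw [ih (by omega), List.drop_eq_getElem_cons hn, List.takeWhile_cons]
    have hsucc : (i + 1).toNat = i.toNat + 1 := by omega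
    simp [hne, hsucc]
    omega
  | case2 i h =>
    have h0i : 0 ≤ i := h0
    by_cases hlt : i < PySem.Str.len text
    · have hne : ¬ (PySem.Str.pyGet? text i).getD '\n' ≠ '\n' := fun hne => h ⟨hlt, hne⟩
      rw [PySem.Str.len_eq] at hlt
      have hn : i.toNat < text.toList.length := by omega
      rw [char_at text i h0i hn] at hne
      simp only [Option.getD_some, ne_eq, not_not] at hne
      rw [List.drop_eq_getElem_cons hn, List.takeWhile_cons]
      simp [hne]
    · rw [PySem.Str.len_eq] at hlt
      have : text.toList.drop i.toNat = [] := List.drop_eq_nil_of_le (by omega)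
      simp [this]

theorem skip_sac_eq (text : String) (idx : Int) (h0 : 0 ≤ idx) :
    skip_space_and_comments text idx = idx + (skipLenB (text.toList.drop idx.toNat) : Int) := by
  fun_induction skip_space_and_comments text idx with
  | case1 i h ch hws ih =>
    rw [PySem.Str.len_eq] at h
    have h0i : 0 ≤ i := h0
    have hn : i.toNat < text.toList.length := by omega
    have hc : ch = text.toList[i.toNat] := by
      simp only [ch, char_at text i h0i hn, Option.getD_some]
    rw [hc, mem_ws_iff] at hws
    have hsucc : (i + 1).toNat = i.toNat + 1 := by omega
    rw [ih (by omega), List.drop_eq_getElem_cons hn, skipLenB, hsucc]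
    simp [hws]
    omega
  | case2 i h ch hws hsemi ih =>
    rw [PySem.Str.len_eq] at h
    have h0i : 0 ≤ i := h0
    have hn : i.toNat < text.toList.length := by omega
    have hc : ch = text.toList[i.toNat] := by
      simp only [ch, char_at text i h0i hn, Option.getD_some]
    rw [hc] at hws hsemi
    have hdropi : text.toList.drop i.toNat
        = text.toList[i.toNat] :: text.toList.drop (i.toNat + 1) := List.drop_eq_getElem_cons hn
    set t := ((text.toList.drop (i.toNat + 1)).takeWhile (fun d => d ≠ '\n')).length with ht
    have hk : skip_comment text i = i + ((t : Int) + 1) := by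
      rw [skip_comment_eq text i h0i, hdropi, List.takeWhile_cons]
      have hne : decide (text.toList[i.toNat] ≠ '\n') = true := by rw [hsemi]; decide
      rw [hne, if_pos rfl, List.length_cons]
      push_cast
      ring
    have hge : 0 ≤ skip_comment text i := by rw [hk]; omega
    have harg : (i + ((t : Int) + 1)).toNat = i.toNat + 1 + t := by omega
    have hR : (skipLenB (text.toList.drop i.toNat) : Int)
        = ((t : Int) + 1) + skipLenB (text.toList.drop (i.toNat + 1 + t)) := by
      rw [hdropi, hsemi, skipLenB, if_neg (by decide), if_pos rfl]
      simp only [← ht, List.drop_drop]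
      push_cast
      ring
    rw [ih hge, hk, harg, hR]
    ring
  | case3 i h ch hws hsemi =>
    rw [PySem.Str.len_eq] at h
    have h0i : 0 ≤ i := h0
    have hn : i.toNat < text.toList.length := by omega
    have hc : ch = text.toList[i.toNat] := by
      simp only [ch, char_at text i h0i hn, Option.getD_some]
    rw [hc, mem_ws_iff] at hws
    rw [hc] at hsemi
    rw [List.drop_eq_getElem_cons hn, skipLenB]
    simp only [Bool.not_eq_true] at hws
    simp [hws, hsemi]
  | case4 i h =>
    rw [PySem.Str.len_eq] at h
    have : text.toList.drop i.toNat = [] := List.drop_eq_nil_of_le (by omega)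
    simp [this, skipLenB]

theorem read_symbol_loop_eq (text : String) (idx : Int) (h0 : 0 ≤ idx) :
    read_symbol_loop text idx
      = idx + (((text.toList.drop idx.toNat).takeWhile (fun c => !termB c)).length : Int) := by
  fun_induction read_symbol_loop text idx with
  | case1 i h ch hbrk =>
    rw [PySem.Str.len_eq] at h
    have h0i : 0 ≤ i := h0
    have hn : i.toNat < text.toList.length := by omega
    have hc : ch = text.toList[i.toNat] := by
      simp only [ch, char_at text i h0i hn, Option.getD_some]
    rw [hc] at hbrk
    have ht : termB (text.toList[i.toNat]) = true := (termB_iff _).mpr (Or.inl hbrk)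
    rw [List.drop_eq_getElem_cons hn, List.takeWhile_cons]
    simp [ht]
  | case2 i h ch hbrk hsemi =>
    rw [PySem.Str.len_eq] at h
    have h0i : 0 ≤ i := h0
    have hn : i.toNat < text.toList.length := by omega
    have hc : ch = text.toList[i.toNat] := by
      simp only [ch, char_at text i h0i hn, Option.getD_some]
    rw [hc] at hsemi
    have ht : termB (text.toList[i.toNat]) = true := (termB_iff _).mpr (Or.inr hsemi)
    rw [List.drop_eq_getElem_cons hn, List.takeWhile_cons]
    simp [ht]
  | case3 i h ch hbrk hsemi ih =>
    rw [PySem.Str.len_eq] at h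
    have h0i : 0 ≤ i := h0
    have hn : i.toNat < text.toList.length := by omega
    have hc : ch = text.toList[i.toNat] := by
      simp only [ch, char_at text i h0i hn, Option.getD_some]
    rw [hc] at hbrk hsemi
    have ht : termB (text.toList[i.toNat]) = false := by
      cases hb : termB (text.toList[i.toNat]) with
      | true =>
        rcases (termB_iff _).mp hb with hb' | hb'
        · exact absurd hb' hbrk
        · exact absurd hb' hsemi
      | false => rfl
    have hsucc : (i + 1).toNat = i.toNat + 1 := by omega
    rw [ih (by omega), List.drop_eq_getElem_cons hn, List.takeWhile_cons, hsucc]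
    simp [ht]
    omega
  | case4 i h =>
    rw [PySem.Str.len_eq] at h
    have : text.toList.drop i.toNat = [] := List.drop_eq_nil_of_le (by omega)
    simp [this]

theorem skipLenB_stop (l : List Char) (c : Char)
    (h : (l.drop (skipLenB l)).head? = some c) : wsB c = false ∧ c ≠ ';' := by
  fun_induction skipLenB l with
  | case1 => simp at h
  | case2 c0 rest hws ih =>
    rw [List.drop_succ_cons] at h
    exact ih h
  | case3 rest k hws ih =>
    rw [show k + 1 + skipLenB (rest.drop k) = (k + skipLenB (rest.drop k)) + 1 from by omega,
        List.drop_succ_cons, ← List.drop_drop] at h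
    exact ih h
  | case4 c0 rest hws hsemi =>
    simp only [List.drop_zero, List.head?_cons, Option.some.injEq] at h
    subst h
    refine ⟨?_, hsemi⟩
    simpa using hws

-- ===== VERDICT (by name: the statement is the Claim_ definition above) =====
theorem read_symbol_spec : Claim_equal_read_symbol := by
  intro text idx hdom hpre
  unfold Spec_read_symbol
  have h0 : 0 ≤ idx := hpre
  simp only [read_symbol, read_symbol_alt, PySem.Str.len_eq]
  by_cases hbig : (text.toList.length : Int) ≤ idx
  · have hdropnil : text.toList.drop idx.toNat = [] := List.drop_eq_nil_of_le (by omega)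
    have h1 : skip_space_and_comments text idx = idx := by
      rw [skip_sac_eq text idx h0, hdropnil, skipLenB]
      push_cast
      ring
    rw [h1, if_pos (by omega), if_pos (by omega)]
  · have hlt : idx < (text.toList.length : Int) := by omega
    rw [if_neg (show ¬ idx ≥ (text.toList.length : Int) from by omega),
        if_neg (show ¬ idx < 0 from by omega)]
    set m := skipLenB (text.toList.drop idx.toNat) with hm
    set j : Nat := idx.toNat + m with hj
    have hA1 : skip_space_and_comments text idx = ((j : Nat) : Int) := by
      rw [skip_sac_eq text idx h0, hj]
      push_cast
      omega
    rw [hA1]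
    have hdd : text.toList.drop j = (text.toList.drop idx.toNat).drop m := by
      rw [List.drop_drop, hj, Nat.add_comm]
    by_cases hjlen : text.toList.length ≤ j
    · have hdropnil : text.toList.drop j = [] := List.drop_eq_nil_of_le hjlen
      rw [hdropnil, if_pos (show ((j : Nat) : Int) ≥ (text.toList.length : Int) from by omega)]
      simp
    · have hjlt : j < text.toList.length := by omega
      have hget : PySem.Str.pyGet? text ((j : Nat) : Int) = some (text.toList[j]) := by
        have h := char_at text ((j : Nat) : Int) (by positivity) (by simpa using hjlt)
        simpa using h
      have hdropj : text.toList.drop j = text.toList[j] :: text.toList.drop (j + 1) :=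
        List.drop_eq_getElem_cons hjlt
      have hstop : wsB (text.toList[j]) = false ∧ text.toList[j] ≠ ';' := by
        apply skipLenB_stop (text.toList.drop idx.toNat)
        rw [← hm, ← hdd, hdropj]
        rfl
      rw [if_neg (show ¬ ((j : Nat) : Int) ≥ (text.toList.length : Int) from by omega), hget]
      simp only [Option.getD_some]
      by_cases hbrk : text.toList[j] ∈ ['(', ')', '[', ']', '{', '}', '"']
      · have ht : termB (text.toList[j]) = true := (termB_iff _).mpr (Or.inl (Or.inr hbrk))
        rw [if_pos hbrk, hdropj, List.takeWhile_cons]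
        simp [ht]
      · have htf : termB (text.toList[j]) = false := by
          cases hb : termB (text.toList[j]) with
          | true =>
            rcases (termB_iff _).mp hb with hw | hs
            · rcases hw with hw | hw
              · exact absurd ((mem_ws_iff _).mp hw) (by simp [hstop.1])
              · exact absurd hw hbrk
            · exact absurd hs hstop.2
          | false => rfl
        rw [if_neg hbrk]
        have hloop := read_symbol_loop_eq text ((j : Nat) : Int) (by positivity)
        rw [Int.toNat_natCast] at hloop
        rw [hloop]
        set tok := (text.toList.drop j).takeWhile (fun c => !termB c) with htok
        have htokcons : tok = text.toList[j] :: (text.toList.drop (j + 1)).takeWhile (fun c => !termB c) := by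
          rw [htok, hdropj, List.takeWhile_cons]
          simp [htf]
        have htokempty : tok.isEmpty = false := by rw [htokcons]; rfl
        rw [htokempty, if_neg (by simp)]
        refine Prod.ext ?_ ?_
        · show some (PySem.Str.slice text (some ((j : Nat) : Int)) (some (((j : Nat) : Int) + (tok.length : Int))))
            = some (String.ofList tok)
          congr 1
          apply String.toList_inj.mp
          rw [PySem.Str.toList_slice, PySem.Chars.slice_eq_listSlice, PySem.List.slice_natCast_add,
            String.toList_ofList]
          exact (List.prefix_iff_eq_take.mp (List.takeWhile_prefix _)).symm
        · show ((j : Nat) : Int) + (tok.length : Int) = ((j + tok.length : Nat) : Int)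
          push_cast
          ring
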